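-- pv_equiv track=rewrite | github.com/deyuwang126/microstate_PDsubtype | MWNs_PLI.py | calculate_state_duration
-- ===== SOURCE A (Python) =====
-- def calculate_state_duration(events, time_step=1):
--     state_duration = []
--     current_state = None
--     current_state_start_time = None
--
--     for time, state in enumerate(events):
--         if current_state is None:
--             current_state = state
--             current_state_start_time = time * time_step
--         elif current_state != state:
--             state_duration.append((current_state, current_state_start_time, time * time_step))
--             current_state = state
--             current_state_start_time = time * time_step
--
--     if current_state is not None:
--         state_duration.append((current_state, current_state_start_time, len(events) * time_step))
--
--     return state_duration
-- ===== SOURCE B (Python) =====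
-- def calculate_state_duration(events, time_step=1):
--     n = len(events)
--     bounds = [i for i in range(n) if i == 0 or events[i] != events[i - 1]]
--     bounds.append(n)
--     return [(events[s], s * time_step, e * time_step)
--             for s, e in zip(bounds, bounds[1:])]
-- ===== Notes on version B (the rewrite author's own statement) =====
-- stated objective: alternative
-- what changed: Replaces A's inline state machine (current_state/current_state_start_time sentinels) by a boundary-index computation: collect the indices where a new run starts, append len(events), and zip consecutive boundaries into (value, start, end) triples.
import Mathlib
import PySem

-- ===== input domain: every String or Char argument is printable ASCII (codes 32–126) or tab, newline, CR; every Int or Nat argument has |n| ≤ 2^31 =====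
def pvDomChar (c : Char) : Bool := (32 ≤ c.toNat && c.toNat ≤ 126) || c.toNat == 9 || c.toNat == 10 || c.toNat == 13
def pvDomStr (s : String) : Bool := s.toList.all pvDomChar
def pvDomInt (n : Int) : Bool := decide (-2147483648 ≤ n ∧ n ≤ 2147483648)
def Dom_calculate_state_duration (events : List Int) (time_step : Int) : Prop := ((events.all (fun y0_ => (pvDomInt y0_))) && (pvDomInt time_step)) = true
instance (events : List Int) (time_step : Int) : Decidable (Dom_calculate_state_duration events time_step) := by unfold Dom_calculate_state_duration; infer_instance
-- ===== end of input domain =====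

-- B replaces A's inline state machine by boundary-index computation + zip of consecutive boundaries (alternative decomposition, same cost).

-- ===== PORT A =====
-- loop body of A's for-loop: state = (state_duration, current_state, current_state_start_time)
def stepA (time_step : Int) (s : List (Int × Int × Int) × Option Int × Int) (p : Int × Int) :
    List (Int × Int × Int) × Option Int × Int :=
  match s.2.1 with
  | none => (s.1, some p.2, p.1 * time_step)
  | some c =>
    if c ≠ p.2 then (s.1 ++ [(c, s.2.2, p.1 * time_step)], some p.2, p.1 * time_step)
    else s

def calculate_state_duration (events : List Int) (time_step : Int) : List (Int × Int × Int) :=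
  let st := (PySem.List.enumerate events).foldl (stepA time_step) ([], none, 0)
  match st.2.1 with
  | none => st.1
  | some c => st.1 ++ [(c, st.2.2, (events.length : Int) * time_step)]

-- ===== PORT B =====
-- 'i == 0 or events[i] != events[i-1]' of Source B's comprehension
def condB (events : List Int) (i : Nat) : Bool :=
  i == 0 || events.getD i 0 != events.getD (i - 1) 0

-- '(events[s], s*time_step, e*time_step)' of Source B's result comprehension
def emitB (events : List Int) (time_step : Int) (p : Nat × Nat) : Int × Int × Int :=
  (events.getD p.1 0, (p.1 : Int) * time_step, (p.2 : Int) * time_step)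

def calculate_state_duration_alt (events : List Int) (time_step : Int) : List (Int × Int × Int) :=
  let n := events.length
  let bounds := (List.range n).filter (condB events) ++ [n]
  (bounds.zip bounds.tail).map (emitB events time_step)

-- ===== PRECONDITION & SPEC =====
def Spec_calculate_state_duration (events : List Int) (time_step : Int) (out : List (Int × Int × Int)) : Prop := out = calculate_state_duration_alt events time_step
instance (events : List Int) (time_step : Int) (out : List (Int × Int × Int)) : Decidable (Spec_calculate_state_duration events time_step out) := by unfold Spec_calculate_state_duration; infer_instance

-- ===== CLAIM (what is proved, stated in full; the proofs are below) =====
def Claim_equal_calculate_state_duration : Prop := ∀ (events : List Int) (time_step : Int), Dom_calculate_state_duration events time_step → Spec_calculate_state_duration events time_step (calculate_state_duration events time_step)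

-- ===== LEMMAS AND PROOFS =====

-- common characterisation: the runs of `rest`, given current run value `cur` started at
-- index `start`, next index `idx`; emits (value, start*t, end*t) per run
def runsFrom (t : Int) : Int → Int → Int → List Int → List (Int × Int × Int)
  | cur, start, idx, [] => [(cur, start * t, idx * t)]
  | cur, start, idx, x :: xs =>
    if x = cur then runsFrom t cur start (idx + 1) xs
    else (cur, start * t, idx * t) :: runsFrom t x idx (idx + 1) xs

-- A's final 'if current_state is not None: append' step, as a function of the loop's end state
def finishA (endT : Int) (st : List (Int × Int × Int) × Option Int × Int) : List (Int × Int × Int) :=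
  match st.2.1 with
  | none => st.1
  | some c => st.1 ++ [(c, st.2.2, endT)]

lemma Aloop (t : Int) (rest : List Int) : ∀ (idx : Int) (acc : List (Int × Int × Int)) (cur start : Int),
    finishA ((idx + (rest.length : Int)) * t)
        ((PySem.List.enumerate rest idx).foldl (stepA t) (acc, some cur, start * t))
    = acc ++ runsFrom t cur start idx rest := by
  induction rest with
  | nil => intro idx acc cur start; simp [PySem.List.enumerate, finishA, runsFrom]
  | cons x xs ih =>
    intro idx acc cur start
    rw [PySem.List.enumerate_cons, List.foldl_cons]
    by_cases h : cur = x
    · have hstep : stepA t (acc, some cur, start * t) (idx, x) = (acc, some cur, start * t) := by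
        simp [stepA, h]
      rw [hstep, runsFrom, if_pos h.symm,
        show idx + (((x :: xs : List Int).length : Nat) : Int) = idx + 1 + (xs.length : Int) by
          simp; ring]
      exact ih (idx + 1) acc cur start
    · have hstep : stepA t (acc, some cur, start * t) (idx, x)
          = (acc ++ [(cur, start * t, idx * t)], some x, idx * t) := by
        simp [stepA, h]
      rw [hstep, runsFrom, if_neg (fun hh => h hh.symm),
        show idx + (((x :: xs : List Int).length : Nat) : Int) = idx + 1 + (xs.length : Int) by
          simp; ring,
        ih (idx + 1) (acc ++ [(cur, start * t, idx * t)]) x idx]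
      simp

lemma Bloop (events : List Int) (t : Int) : ∀ (rest : List Int) (idx start : Nat) (cur : Int),
    rest = events.drop idx → 1 ≤ idx → idx ≤ events.length →
    events.getD start 0 = cur → events.getD (idx - 1) 0 = cur →
    ((start :: (List.range' idx (events.length - idx)).filter (condB events)).zip
      ((List.range' idx (events.length - idx)).filter (condB events) ++ [events.length])).map
        (emitB events t)
    = runsFrom t cur (start : Int) (idx : Int) rest := by
  intro rest
  induction rest with
  | nil =>
    intro idx start cur hdrop h1 hle hstart hprev
    have hn : events.length = idx := by
      have := congrArg List.length hdrop
      simp [List.length_drop] at this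
      omega
    rw [List.getD_eq_getElem?_getD] at hstart
    simp [hn, runsFrom, emitB, hstart]
  | cons x xs ih =>
    intro idx start cur hdrop h1 hle hstart hprev
    have hlt : idx < events.length := by
      have := congrArg List.length hdrop
      simp [List.length_drop] at this
      omega
    have hx : events.getD idx 0 = x := by
      have h0 : (events.drop idx)[0]? = some x := by rw [← hdrop]; simp
      rw [List.getElem?_drop] at h0
      simp at h0
      simp [List.getD_eq_getElem?_getD, h0]
    have hxs : xs = events.drop (idx + 1) := by
      have : (events.drop idx).drop 1 = xs := by rw [← hdrop]; simp
      rw [List.drop_drop] at this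
      rw [← this]
    have hrange : List.range' idx (events.length - idx)
        = idx :: List.range' (idx + 1) (events.length - (idx + 1)) := by
      have h2 : events.length - idx = (events.length - (idx + 1)) + 1 := by omega
      rw [h2, List.range'_succ]
    have hprev' : events.getD (idx + 1 - 1) 0 = x := by
      simp only [Nat.add_sub_cancel]; exact hx
    by_cases h : x = cur
    · have hcond : condB events idx = false := by
        unfold condB
        rw [hx, hprev, h]
        simp
        omega
      rw [hrange]
      simp only [List.filter_cons, hcond, Bool.false_eq_true, if_false]
      have := ih (idx + 1) start cur hxs (by omega) (by omega) hstart (by rw [hprev']; exact h)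
      rw [runsFrom, if_pos h]
      push_cast at this ⊢
      exact this
    · have hcond : condB events idx = true := by
        unfold condB
        rw [hx, hprev]
        simp [bne_iff_ne, h]
      rw [hrange]
      simp only [List.filter_cons, hcond, if_true]
      rw [List.cons_append, List.zip_cons_cons, List.map_cons]
      have := ih (idx + 1) idx x hxs (by omega) (by omega) hx hprev'
      rw [runsFrom, if_neg h, this]
      refine congrArg₂ (· :: ·) ?_ ?_
      · simp only [emitB]
        rw [hstart]
      · push_cast
        rfl

lemma zip_append_right {A B : Type} (l : List A) (l' : List B) (a : A)
    (h : l.length = l'.length) : (l ++ [a]).zip l' = l.zip l' := by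
  induction l generalizing l' with
  | nil => cases l' with
    | nil => simp
    | cons b bs => simp at h
  | cons x xs ih =>
    cases l' with
    | nil => simp at h
    | cons b bs =>
      simp only [List.cons_append, List.zip_cons_cons]
      rw [ih bs (by simpa using h)]

lemma A_runs (e : Int) (tail : List Int) (t : Int) :
    calculate_state_duration (e :: tail) t = runsFrom t e 0 1 tail := by
  have h0 : calculate_state_duration (e :: tail) t
      = finishA (((e :: tail).length : Int) * t)
          ((PySem.List.enumerate (e :: tail) 0).foldl (stepA t) ([], none, 0)) := rfl
  rw [h0, PySem.List.enumerate_cons, List.foldl_cons]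
  have hstep : stepA t ([], none, 0) ((0 : Int), e) = ([], some e, 0 * t) := by simp [stepA]
  rw [hstep,
    show (((e :: tail).length : Nat) : Int) * t = (1 + (tail.length : Int)) * t by
      push_cast [List.length_cons]; ring]
  simpa using Aloop t tail 1 [] e 0

lemma B_runs (e : Int) (tail : List Int) (t : Int) :
    calculate_state_duration_alt (e :: tail) t = runsFrom t e 0 1 tail := by
  rw [show calculate_state_duration_alt (e :: tail) t
      = (((List.range (e :: tail).length).filter (condB (e :: tail)) ++ [(e :: tail).length]).zip
          (((List.range (e :: tail).length).filter (condB (e :: tail))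
            ++ [(e :: tail).length]).tail)).map (emitB (e :: tail) t) from rfl]
  rw [List.range_eq_range',
    show List.range' 0 (e :: tail).length = 0 :: List.range' 1 ((e :: tail).length - 1) by
      simp [List.range'_succ]]
  rw [List.filter_cons, show condB (e :: tail) 0 = true by simp [condB]]
  simp only [reduceIte]
  rw [List.cons_append, List.tail_cons]
  rw [← List.cons_append, zip_append_right _ _ _ (by simp)]
  have := Bloop (e :: tail) t tail 1 0 e (by simp) (by omega) (by simp) (by simp) (by simp)
  simpa using this

-- ===== VERDICT (by name: the statement is the Claim_ definition above) =====
theorem calculate_state_duration_spec : Claim_equal_calculate_state_duration := by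
  intro events t _
  unfold Spec_calculate_state_duration
  cases events with
  | nil => simp [calculate_state_duration, calculate_state_duration_alt, PySem.List.enumerate]
  | cons e tail => rw [A_runs, B_runs]
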